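-- pv_equiv track=rewrite | github.com/coastalcph/eacl2021-morpherror | scripts/process_parseme2018.py | find_bad_ids
-- ===== SOURCE A (Python) =====
-- def find_bad_ids(gold, pred):
--     bad = set()
--     for gold_type, gold_ids in gold.values():
--         # find best-matching mwe in pred
--         best = (None, 0)
--         for id_, pred_mwe in pred.items():
--             pred_type, pred_ids = pred_mwe
--             if pred_type == gold_type and len(pred_ids & gold_ids) > best[1]:
--                 best = (id_, len(pred_ids & gold_ids))
--         # match it up
--         if best[0] is not None:
--             _, pred_ids = pred[best[0]]
--             bad.update(gold_ids ^ pred_ids)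
--             del pred[best[0]]
--     # anything not matched up yet?
--     for _, pred_ids in pred.values():
--         bad.update(pred_ids)
--
--     return bad
-- ===== SOURCE B (Python) =====
-- def find_bad_ids(gold, pred):
--     # Return-value equivalent to A; unlike A it does NOT mutate `pred`.
--     # Inverted index token -> pred ids sharing that token; per gold MWE the
--     # overlap counts come from the index buckets instead of |gold|*|pred| set
--     # intersections; matched preds are marked in `removed` instead of deleted.
--     order = {}
--     for pid in pred:
--         order[pid] = len(order)
--     index = {}
--     for pid, (_ptype, pids) in pred.items():
--         for t in pids:
--             index.setdefault(t, []).append(pid)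
--     bad = set()
--     removed = set()
--     for gtype, gids in gold.values():
--         counts = {}
--         for t in gids:
--             for pid in index.get(t, []):
--                 if pid not in removed and pred[pid][0] == gtype:
--                     counts[pid] = counts.get(pid, 0) + 1
--         best_id, best_n = None, 0
--         for pid, n in counts.items():
--             if n > best_n or (n == best_n and best_id is not None
--                               and order[pid] < order[best_id]):
--                 best_id, best_n = pid, n
--         if best_id is not None:
--             bad |= gids ^ pred[best_id][1]
--             removed.add(best_id)
--     for pid, (_ptype, pids) in pred.items():
--         if pid not in removed:
--             bad |= pids
--     return bad
-- ===== Notes on version B (the rewrite author's own statement) =====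
-- stated objective: faster
-- what changed: Replaces the per-gold scan over all preds with |pred_ids & gold_ids| set intersections by a token->pred-ids inverted index built once: per gold MWE, overlap counts are accumulated only for preds actually sharing a token, and the best match (max overlap, earliest pred for ties) is picked from that counter via a precomputed insertion-order map; matched preds are marked removed instead of deleted, and unlike A, B does not mutate the pred dict.
import Mathlib
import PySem

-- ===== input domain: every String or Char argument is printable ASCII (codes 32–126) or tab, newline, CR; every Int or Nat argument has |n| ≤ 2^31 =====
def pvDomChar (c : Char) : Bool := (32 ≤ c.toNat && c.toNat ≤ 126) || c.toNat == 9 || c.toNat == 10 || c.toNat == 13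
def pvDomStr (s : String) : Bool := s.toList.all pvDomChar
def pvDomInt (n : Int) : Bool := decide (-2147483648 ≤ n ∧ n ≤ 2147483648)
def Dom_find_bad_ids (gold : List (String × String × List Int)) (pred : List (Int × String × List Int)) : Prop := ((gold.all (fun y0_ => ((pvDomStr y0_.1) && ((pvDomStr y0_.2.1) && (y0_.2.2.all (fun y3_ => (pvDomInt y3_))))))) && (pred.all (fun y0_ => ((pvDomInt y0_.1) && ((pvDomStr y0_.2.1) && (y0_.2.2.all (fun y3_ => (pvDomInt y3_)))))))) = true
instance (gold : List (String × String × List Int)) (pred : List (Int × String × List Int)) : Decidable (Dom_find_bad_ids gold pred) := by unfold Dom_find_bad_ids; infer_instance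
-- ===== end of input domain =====

-- B is faster by an inverted index (token -> pred ids): per gold MWE it counts overlaps only
-- for preds sharing a token, instead of intersecting every pred's id set with the gold set.
-- NOTE on side effects: Python A deletes matched entries from its `pred` dict argument; B does
-- not mutate `pred`. The equivalence proved here is about the RETURN value only.

-- ===== PORT A =====
-- the loop body of `for gold_type, gold_ids in gold.values()`: find the best-matching pred,
-- add the symmetric difference to `bad` and delete the matched pred
def pvStepA (st : PySem.Set Int × PySem.Dict Int (String × PySem.Set Int))
    (gv : String × PySem.Set Int) : PySem.Set Int × PySem.Dict Int (String × PySem.Set Int) :=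
  let best : Option Int × Int := st.2.items.foldl (fun b it =>
      if it.2.1 = gv.1 ∧ ((PySem.Set.inter it.2.2 gv.2).length : Int) > b.2
      then (some it.1, ((PySem.Set.inter it.2.2 gv.2).length : Int)) else b) (none, 0)
  match best.1 with
  | some bid =>
      match st.2.get? bid with
      | some pm => (PySem.Set.update st.1 (PySem.Set.symmDiff gv.2 pm.2), st.2.erase bid)
      | none => st
  | none => st

def find_bad_ids (gold : List (String × String × List Int)) (pred : List (Int × String × List Int)) : List Int :=
  let goldD := PySem.Dict.ofList (gold.map (fun g => (g.1, (g.2.1, PySem.Set.ofList g.2.2))))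
  let predD := PySem.Dict.ofList (pred.map (fun p => (p.1, (p.2.1, PySem.Set.ofList p.2.2))))
  let res := goldD.values.foldl pvStepA (PySem.Set.empty, predD)
  res.2.values.foldl (fun bad pv => PySem.Set.update bad pv.2) res.1

-- ===== PORT B =====
-- order = {}; for pid in pred: order[pid] = len(order)
def pvMkOrder (ks : List Int) : PySem.Dict Int Int :=
  ks.foldl (fun d k => d.insert k (d.size : Int)) PySem.Dict.empty

-- index = {}; for pid, (_, pids) in pred.items(): for t in pids: index.setdefault(t, []).append(pid)
def pvMkIndex (items : List (Int × String × PySem.Set Int)) : PySem.Dict Int (List Int) :=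
  items.foldl (fun d it => it.2.2.foldl (fun d t => d.modify t [] (· ++ [it.1])) d) PySem.Dict.empty

-- counts = {}; for t in gids: for pid in index.get(t, []): if pid not in removed and pred[pid][0] == gtype: counts[pid] += 1
def pvCounts (predD : PySem.Dict Int (String × PySem.Set Int)) (index : PySem.Dict Int (List Int))
    (removed : PySem.Set Int) (gtype : String) (gids : PySem.Set Int) : PySem.Dict Int Int :=
  gids.foldl (fun c t => (index.getD t []).foldl (fun c pid =>
      if PySem.Set.contains removed pid = false ∧ (predD.getD pid ("", [])).1 = gtype
      then c.modify pid 0 (· + 1) else c) c) PySem.Dict.empty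

-- the selection loop over counts.items(): max count, ties to the earlier pred
def pvSelect (order : PySem.Dict Int Int) (counts : PySem.Dict Int Int) : Option Int × Int :=
  counts.items.foldl (fun b it =>
      if it.2 > b.2 ∨ (it.2 = b.2 ∧ b.1.isSome ∧ order.getD it.1 0 < order.getD (b.1.getD 0) 0)
      then (some it.1, it.2) else b) (none, 0)

def pvStepB (predD : PySem.Dict Int (String × PySem.Set Int)) (index : PySem.Dict Int (List Int))
    (order : PySem.Dict Int Int) (st : PySem.Set Int × PySem.Set Int)
    (gv : String × PySem.Set Int) : PySem.Set Int × PySem.Set Int :=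
  let counts := pvCounts predD index st.2 gv.1 gv.2
  match (pvSelect order counts).1 with
  | some bid => (PySem.Set.update st.1 (PySem.Set.symmDiff gv.2 (predD.getD bid ("", [])).2),
                 PySem.Set.add st.2 bid)
  | none => st

def find_bad_ids_alt (gold : List (String × String × List Int)) (pred : List (Int × String × List Int)) : List Int :=
  let goldD := PySem.Dict.ofList (gold.map (fun g => (g.1, (g.2.1, PySem.Set.ofList g.2.2))))
  let predD := PySem.Dict.ofList (pred.map (fun p => (p.1, (p.2.1, PySem.Set.ofList p.2.2))))
  let order := pvMkOrder predD.keys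
  let index := pvMkIndex predD.items
  let res := goldD.values.foldl (pvStepB predD index order) (PySem.Set.empty, PySem.Set.empty)
  predD.items.foldl (fun bad it =>
      if PySem.Set.contains res.2 it.1 = false then PySem.Set.update bad it.2.2 else bad) res.1

-- ===== PRECONDITION & SPEC =====
def Spec_find_bad_ids (gold : List (String × String × List Int)) (pred : List (Int × String × List Int)) (out : List Int) : Prop := out = find_bad_ids_alt gold pred
instance (gold : List (String × String × List Int)) (pred : List (Int × String × List Int)) (out : List Int) : Decidable (Spec_find_bad_ids gold pred out) := by unfold Spec_find_bad_ids; infer_instance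

-- ===== CLAIM (what is proved, stated in full; the proofs are below) =====
def Claim_equal_find_bad_ids : Prop := ∀ (gold : List (String × String × List Int)) (pred : List (Int × String × List Int)), Dom_find_bad_ids gold pred → Spec_find_bad_ids gold pred (find_bad_ids gold pred)

-- ===== LEMMAS AND PROOFS =====

def pvIsBest (ordf : Int → Int) (M : List (Int × Int)) (b : Option Int × Int) : Prop :=
  (M = [] → b = (none, 0)) ∧
  (M ≠ [] → ∃ pid, b.1 = some pid ∧ (pid, b.2) ∈ M ∧
      ∀ x ∈ M, x.2 < b.2 ∨ (x.2 = b.2 ∧ ordf pid ≤ ordf x.1))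

theorem pvIsBest_congr (ordf : Int → Int) (M M' : List (Int × Int)) (b : Option Int × Int)
    (h : ∀ x, x ∈ M ↔ x ∈ M') (hb : pvIsBest ordf M b) : pvIsBest ordf M' b := by
  obtain ⟨h0, h1⟩ := hb
  constructor
  · intro hM'
    apply h0
    rw [List.eq_nil_iff_forall_not_mem] at hM' ⊢
    intro x hx; exact hM' x ((h x).mp hx)
  · intro hM'
    have hM : M ≠ [] := by
      intro hnil; subst hnil
      exact hM' (List.eq_nil_iff_forall_not_mem.mpr (fun x hx => by simpa using (h x).mpr hx))
    obtain ⟨pid, hb1, hmem, hall⟩ := h1 hM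
    exact ⟨pid, hb1, (h _).mp hmem, fun x hx => hall x ((h x).mpr hx)⟩

theorem pvIsBest_unique (ordf : Int → Int) (M : List (Int × Int)) (b b' : Option Int × Int)
    (hinj : ∀ x ∈ M, ∀ y ∈ M, ordf x.1 = ordf y.1 → x = y)
    (h : pvIsBest ordf M b) (h' : pvIsBest ordf M b') : b = b' := by
  obtain ⟨h0, h1⟩ := h
  obtain ⟨h0', h1'⟩ := h'
  rcases eq_or_ne M [] with hM | hM
  · rw [h0 hM, h0' hM]
  · obtain ⟨p, hb1, hmem, hall⟩ := h1 hM
    obtain ⟨q, hb1', hmem', hall'⟩ := h1' hM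
    have H1 := hall _ hmem'
    have H2 := hall' _ hmem
    have hval : b.2 = b'.2 := by omega
    have hord : ordf p = ordf q := by
      simp only at H1 H2
      rcases H1 with h | ⟨h, hle⟩
      · omega
      rcases H2 with h2 | ⟨h2, hle2⟩
      · omega
      omega
    have := hinj _ hmem _ hmem' hord
    have hpq : p = q := congrArg Prod.fst this
    have e1 : b = (b.1, b.2) := rfl
    have e2 : b' = (b'.1, b'.2) := rfl
    rw [e1, e2, hb1, hb1', hpq, hval]

theorem pv_get?_foldl_insert_not_mem (l : List Int) (d : PySem.Dict Int Int) (k : Int)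
    (h : k ∉ l) :
    (l.foldl (fun d x => d.insert x (d.size : Int)) d).get? k = d.get? k := by
  induction l generalizing d with
  | nil => rfl
  | cons x t ih =>
    simp only [List.foldl_cons]
    rw [ih _ (by simp at h; exact h.2)]
    exact PySem.Dict.get?_insert_of_ne _ _ (by simp at h; exact h.1)

theorem pvMkOrder_getD_aux (ks : List Int) (d : PySem.Dict Int Int)
    (hnd : ks.Nodup) (hfresh : ∀ k ∈ ks, d.contains k = false)
    (i : Nat) (h : i < ks.length) :
    (ks.foldl (fun d x => d.insert x (d.size : Int)) d).getD ks[i] 0 = (d.size : Int) + i := by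
  induction ks generalizing d i with
  | nil => simp at h
  | cons x t ih =>
    simp only [List.foldl_cons]
    rcases i with _ | j
    · simp only [List.getElem_cons_zero]
      have hx : x ∉ t := (List.nodup_cons.mp hnd).1
      rw [PySem.Dict.getD_eq_get?_getD, pv_get?_foldl_insert_not_mem t _ x hx,
        PySem.Dict.get?_insert_self]
      simp
    · simp only [List.getElem_cons_succ]
      have hsz : (d.insert x (d.size : Int)).size = d.size + 1 := by
        rw [PySem.Dict.size_insert, if_neg]
        simp [hfresh x (by simp)]
      have := ih (d.insert x (d.size : Int)) (List.nodup_cons.mp hnd).2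
        (fun k hk => by
          rw [PySem.Dict.contains_insert, hfresh k (by simp [hk])]
          have : k ≠ x := by rintro rfl; exact (List.nodup_cons.mp hnd).1 hk
          simp [this])
        j (by simpa using h)
      rw [this, hsz]
      push_cast
      ring

theorem pvMkOrder_getD (ks : List Int) (hnd : ks.Nodup) (i : Nat) (h : i < ks.length) :
    (pvMkOrder ks).getD ks[i] 0 = (i : Int) := by
  have := pvMkOrder_getD_aux ks PySem.Dict.empty hnd (by simp [PySem.Dict.contains_empty]) i h
  simpa [pvMkOrder, PySem.Dict.size_empty] using this

theorem pvMkOrder_inj (ks : List Int) (hnd : ks.Nodup) (k1 k2 : Int)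
    (h1 : k1 ∈ ks) (h2 : k2 ∈ ks)
    (he : (pvMkOrder ks).getD k1 0 = (pvMkOrder ks).getD k2 0) : k1 = k2 := by
  obtain ⟨i, hi, rfl⟩ := List.getElem_of_mem h1
  obtain ⟨j, hj, rfl⟩ := List.getElem_of_mem h2
  rw [pvMkOrder_getD ks hnd i hi, pvMkOrder_getD ks hnd j hj] at he
  have : i = j := by exact_mod_cast he
  subst this; rfl

theorem pvMkOrder_lt (ks : List Int) (hnd : ks.Nodup) (i j : Nat)
    (hij : i < j) (hj : j < ks.length) :
    (pvMkOrder ks).getD ks[i] 0 < (pvMkOrder ks).getD ks[j] 0 := by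
  rw [pvMkOrder_getD ks hnd i (by omega), pvMkOrder_getD ks hnd j hj]
  exact_mod_cast hij

def pvPairs (items : List (Int × String × PySem.Set Int)) : List (Int × Int) :=
  items.flatMap (fun it => it.2.2.map (fun t => (t, it.1)))

theorem pvMkIndex_getD (items : List (Int × String × PySem.Set Int)) (t : Int) :
    (pvMkIndex items).getD t [] =
      ((pvPairs items).filter (fun p => p.1 == t)).map (·.2) := by
  have : pvMkIndex items =
      (pvPairs items).foldl (fun d p => d.modify p.1 [] (· ++ [p.2])) PySem.Dict.empty := by
    rw [pvPairs, List.foldl_flatMap]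
    unfold pvMkIndex
    congr 1
    funext d it
    rw [List.foldl_map]
  rw [this, PySem.Dict.getD_foldl_modify_append]
  simp

theorem pv_mem_index (items : List (Int × String × PySem.Set Int)) (t pid : Int) :
    pid ∈ (pvMkIndex items).getD t [] ↔ ∃ it ∈ items, it.1 = pid ∧ t ∈ it.2.2 := by
  rw [pvMkIndex_getD]
  simp only [List.mem_map, List.mem_filter, pvPairs, List.mem_flatMap]
  constructor
  · rintro ⟨p, ⟨⟨it, hit, hmem⟩, ht⟩, rfl⟩
    obtain ⟨tt, htt, rfl⟩ := hmem
    simp only [beq_iff_eq] at ht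
    exact ⟨it, hit, rfl, ht ▸ htt⟩
  · rintro ⟨it, hit, rfl, ht⟩
    exact ⟨(t, it.1), ⟨⟨it, hit, ⟨t, ht, rfl⟩⟩, by simp⟩, rfl⟩

theorem pv_count_index (items : List (Int × String × PySem.Set Int))
    (hkeys : (items.map (·.1)).Nodup) (hids : ∀ it ∈ items, it.2.2.Nodup)
    (pid : Int) (pt : String) (pids : PySem.Set Int) (hent : (pid, pt, pids) ∈ items) (t : Int) :
    List.count pid ((pvMkIndex items).getD t []) = if t ∈ pids then 1 else 0 := by
  rw [pvMkIndex_getD]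
  induction items with
  | nil => simp at hent
  | cons it rest ih =>
    rw [pvPairs, List.flatMap_cons, ← pvPairs, List.filter_append, List.map_append,
      List.count_append]
    have hkr : (rest.map (·.1)).Nodup := (List.nodup_cons.mp hkeys).2
    have hcnt : List.count t it.2.2 = if t ∈ it.2.2 then 1 else 0 := by
      by_cases hm : t ∈ it.2.2
      · rw [if_pos hm]
        exact List.count_eq_one_of_mem (hids it (by simp)) hm
      · rw [if_neg hm, List.count_eq_zero_of_not_mem hm]
    have hblock : List.count pid ((List.filter (fun p => p.1 == t) (it.2.2.map (fun t' => (t', it.1)))).map (·.2))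
        = if it.1 = pid ∧ t ∈ it.2.2 then 1 else 0 := by
      rw [List.filter_map, List.map_map]
      have h1 : List.filter ((fun p => p.1 == t) ∘ (fun t' => (t', it.1))) it.2.2
          = List.filter (fun t' => t' == t) it.2.2 := by rfl
      rw [h1]
      have h2 : List.map ((·.2) ∘ (fun t' => ((t' : Int), it.1))) (List.filter (fun t' => t' == t) it.2.2)
          = List.replicate (List.filter (fun t' => t' == t) it.2.2).length it.1 := by
        rw [List.eq_replicate_iff]
        refine ⟨by simp, ?_⟩
        intro b hb
        obtain ⟨a, -, rfl⟩ := List.mem_map.mp hb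
        rfl
      rw [h2, List.count_replicate]
      have hlen : (List.filter (fun t' => t' == t) it.2.2).length = List.count t it.2.2 := by
        rw [List.count_eq_countP, List.countP_eq_length_filter]
      rw [hlen, hcnt]
      rcases eq_or_ne it.1 pid with h | h
      · subst h
        by_cases hm : t ∈ it.2.2 <;> simp [hm]
      · simp [h]
    rcases List.mem_cons.mp hent with heq | hrest
    · subst heq
      have hpidnotin : pid ∉ rest.map (·.1) := by
        simpa using (List.nodup_cons.mp hkeys).1
      have hrest0 : List.count pid ((List.filter (fun p => p.1 == t) (pvPairs rest)).map (·.2)) = 0 := by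
        rw [List.count_eq_zero]
        intro hmem
        obtain ⟨p, hp, rfl⟩ := List.mem_map.mp hmem
        have hp2 := (List.mem_filter.mp hp).1
        obtain ⟨it', hit', hmem'⟩ := List.mem_flatMap.mp hp2
        obtain ⟨tt, -, rfl⟩ := List.mem_map.mp hmem'
        exact hpidnotin (List.mem_map_of_mem hit')
      rw [hblock, hrest0]
      simp
    · have hne : it.1 ≠ pid := by
        intro h
        have hm : pid ∈ rest.map (fun x => x.1) := List.mem_map_of_mem hrest
        have h2 : (fun x => x.1) it ∉ rest.map (fun x => x.1) := (List.nodup_cons.mp hkeys).1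
        apply h2
        show it.1 ∈ rest.map (fun x => x.1)
        rw [h]
        exact hm
      rw [hblock, if_neg (by tauto), ih hkr (fun x hx => hids x (by simp [hx])) hrest]
      simp

theorem pvCounts_eq_counter (predD : PySem.Dict Int (String × PySem.Set Int))
    (index : PySem.Dict Int (List Int)) (removed : PySem.Set Int) (gtype : String)
    (gids : PySem.Set Int) :
    pvCounts predD index removed gtype gids =
      PySem.Dict.counter ((gids.flatMap (fun t => index.getD t [])).filter
        (fun pid => decide (PySem.Set.contains removed pid = false ∧ (predD.getD pid ("", [])).1 = gtype))) := by
  unfold pvCounts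
  rw [← List.foldl_flatMap, PySem.List.foldl_ite_eq_foldl_filter
    (p := fun pid => PySem.Set.contains removed pid = false ∧ (predD.getD pid ("", [])).1 = gtype),
    PySem.Dict.counter_eq_foldl]

theorem pv_mem_counter_items (xs : List Int) (pid n : Int) :
    (pid, n) ∈ (PySem.Dict.counter xs).items ↔ pid ∈ xs ∧ n = (xs.count pid : Int) := by
  rw [PySem.Dict.items_counter]
  constructor
  · intro h
    obtain ⟨k, hk, heq⟩ := List.mem_map.mp h
    have h1 : k = pid := congrArg Prod.fst heq
    subst h1
    exact ⟨(PySem.Set.mem_ofList xs k).mp hk, (congrArg Prod.snd heq).symm⟩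
  · rintro ⟨hm, rfl⟩
    exact List.mem_map_of_mem ((PySem.Set.mem_ofList xs pid).mpr hm)

theorem pv_sum_ite (l : List Int) (p : Int → Prop) [DecidablePred p] :
    (l.map (fun t => if p t then (1 : Nat) else 0)).sum = l.countP (fun t => decide (p t)) := by
  induction l with
  | nil => rfl
  | cons x t ih =>
    rw [List.map_cons, List.sum_cons, ih, List.countP_cons]
    by_cases h : p x
    · simp [h]
      omega
    · simp [h]

theorem pv_countP_comm (l1 l2 : List Int) (h1 : l1.Nodup) (h2 : l2.Nodup) :
    l1.countP (fun a => l2.contains a) = l2.countP (fun a => l1.contains a) := by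
  rw [List.countP_eq_length_filter, List.countP_eq_length_filter]
  apply List.Perm.length_eq
  rw [List.perm_ext_iff_of_nodup (h1.filter _) (h2.filter _)]
  intro a
  simp only [List.mem_filter] at *
  constructor
  · rintro ⟨ha, hb⟩
    exact ⟨by simpa using hb, by simpa using ha⟩
  · rintro ⟨ha, hb⟩
    exact ⟨by simpa using hb, by simpa using ha⟩

theorem scanA (ordf : Int → Int) (gt : String) (gids : PySem.Set Int)
    (items : List (Int × String × PySem.Set Int)) (b : Option Int × Int) (Mpre : List (Int × Int))
    (hb : pvIsBest ordf Mpre b) (hb2 : 0 ≤ b.2)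
    (hcross : ∀ m ∈ Mpre, ∀ it ∈ items, ordf m.1 < ordf it.1)
    (hpair : items.Pairwise (fun a c => ordf a.1 < ordf c.1)) :
    pvIsBest ordf
      (Mpre ++ (items.filter (fun p => decide (p.2.1 = gt) &&
          decide (0 < ((PySem.Set.inter p.2.2 gids).length : Int)))).map
            (fun p => (p.1, ((PySem.Set.inter p.2.2 gids).length : Int))))
      (items.foldl (fun b it =>
        if it.2.1 = gt ∧ ((PySem.Set.inter it.2.2 gids).length : Int) > b.2
        then (some it.1, ((PySem.Set.inter it.2.2 gids).length : Int)) else b) b) := by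
  induction items generalizing b Mpre with
  | nil => simpa using hb
  | cons x rest ih =>
    simp only [List.foldl_cons, List.filter_cons]
    have hpair' := List.pairwise_cons.mp hpair
    set n : Int := ((PySem.Set.inter x.2.2 gids).length : Int) with hn
    by_cases hcand : x.2.1 = gt ∧ 0 < n
    · -- x is a candidate: it survives the filter
      have hfc : (decide (x.2.1 = gt) && decide (0 < ((PySem.Set.inter x.2.2 gids).length : Int))) = true := by
        simp [← hn, hcand.1, hcand.2]
      rw [hfc]
      have hstep : pvIsBest ordf (Mpre ++ [(x.1, n)])
          (if x.2.1 = gt ∧ n > b.2 then (some x.1, n) else b) ∧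
          0 ≤ (if x.2.1 = gt ∧ n > b.2 then (some x.1, n) else b).2 := by
        obtain ⟨h0, h1⟩ := hb
        split_ifs with hc
        · refine ⟨⟨by simp, fun _ => ⟨x.1, rfl, by simp, ?_⟩⟩, by simp; omega⟩
          intro y hy
          simp only [List.mem_append, List.mem_singleton] at hy
          rcases hy with hy | hy
          · have hMne : Mpre ≠ [] := by rintro rfl; simp at hy
            obtain ⟨p, hp1, hpm, hall⟩ := h1 hMne
            have := hall y hy
            simp only
            omega
          · subst hy; right; simp
        · push Not at hc
          have hle : n ≤ b.2 := hc hcand.1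
          have hMne : Mpre ≠ [] := by
            rintro rfl
            rw [h0 rfl] at hle
            simp at hle; omega
          obtain ⟨p, hp1, hpm, hall⟩ := h1 hMne
          refine ⟨⟨by simp, fun _ => ⟨p, hp1, by simp [hpm], ?_⟩⟩, hb2⟩
          intro y hy
          simp only [List.mem_append, List.mem_singleton] at hy
          rcases hy with hy | hy
          · exact hall y hy
          · subst hy
            rcases lt_or_eq_of_le hle with h | h
            · left; exact h
            · right
              refine ⟨h, le_of_lt (hcross (p, b.2) hpm x (by simp))⟩
      have := ih _ (Mpre ++ [(x.1, n)]) hstep.1 hstep.2 ?_ hpair'.2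
      · simpa [List.append_assoc] using this
      · intro m hm it hit
        simp only [List.mem_append, List.mem_singleton] at hm
        rcases hm with hm | hm
        · exact hcross m hm it (by simp [hit])
        · subst hm; exact hpair'.1 it hit
    · -- not a candidate: filtered out and the branch never fires
      have hfc : (decide (x.2.1 = gt) && decide (0 < ((PySem.Set.inter x.2.2 gids).length : Int))) = false := by
        rcases not_and_or.mp hcand with h | h <;> simp [← hn, h]
      rw [hfc]
      have hnofire : (if x.2.1 = gt ∧ n > b.2 then (some x.1, n) else b) = b := by
        rw [if_neg]
        rintro ⟨h1, h2⟩
        exact hcand ⟨h1, by omega⟩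
      rw [hnofire]
      exact ih _ Mpre hb hb2 (fun m hm it hit => hcross m hm it (by simp [hit])) hpair'.2

theorem scanB (ordf : Int → Int) (order : PySem.Dict Int Int)
    (hord : ∀ k, order.getD k 0 = ordf k)
    (K : List (Int × Int)) (b : Option Int × Int) (Mpre : List (Int × Int))
    (hb : pvIsBest ordf Mpre b) (hb2 : 0 ≤ b.2) (hK : ∀ x ∈ K, 1 ≤ x.2) :
    pvIsBest ordf (Mpre ++ K)
      (K.foldl (fun b it =>
        if it.2 > b.2 ∨ (it.2 = b.2 ∧ b.1.isSome ∧ order.getD it.1 0 < order.getD (b.1.getD 0) 0)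
        then (some it.1, it.2) else b) b) := by
  induction K generalizing b Mpre with
  | nil => simpa using hb
  | cons x rest ih =>
    simp only [List.foldl_cons]
    have hx1 : 1 ≤ x.2 := hK x (by simp)
    have hstep : pvIsBest ordf (Mpre ++ [x])
        (if x.2 > b.2 ∨ (x.2 = b.2 ∧ b.1.isSome ∧ order.getD x.1 0 < order.getD (b.1.getD 0) 0)
         then (some x.1, x.2) else b) ∧
        0 ≤ (if x.2 > b.2 ∨ (x.2 = b.2 ∧ b.1.isSome ∧ order.getD x.1 0 < order.getD (b.1.getD 0) 0)
         then (some x.1, x.2) else b).2 := by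
      obtain ⟨h0, h1⟩ := hb
      split_ifs with hc
      · refine ⟨⟨by simp, fun _ => ⟨x.1, rfl, by simp, ?_⟩⟩, by simpa using by omega⟩
        intro y hy
        simp only [List.mem_append, List.mem_singleton] at hy
        rcases hy with hy | hy
        · -- y ∈ Mpre
          have hMne : Mpre ≠ [] := by rintro rfl; simp at hy
          obtain ⟨p, hp1, hpm, hall⟩ := h1 hMne
          have := hall y hy
          rcases hc with hgt | ⟨heq, hsome, hlt⟩
          · simp only; omega
          · rw [hp1] at hlt
            simp only [Option.getD_some] at hlt
            rw [hord, hord] at hlt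
            rcases this with h | ⟨h, h2⟩
            · simp only; omega
            · right
              constructor
              · omega
              · omega
        · subst hy; right; simp
      · -- did not fire
        push Not at hc
        obtain ⟨hle, hc2⟩ := hc
        have hMne : Mpre ≠ [] := by
          rintro rfl
          rw [h0 rfl] at hle
          simp at hle; omega
        obtain ⟨p, hp1, hpm, hall⟩ := h1 hMne
        refine ⟨⟨by simp, fun _ => ⟨p, hp1, by simp [hpm], ?_⟩⟩, hb2⟩
        intro y hy
        simp only [List.mem_append, List.mem_singleton] at hy
        rcases hy with hy | hy
        · exact hall y hy
        · subst hy
          rcases lt_or_eq_of_le (by omega : y.2 ≤ b.2) with h | h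
        
          · left; exact h
          · right; refine ⟨h, ?_⟩
            have h3 := hc2 h
            rw [hp1] at h3
            simp only [Option.isSome_some, Option.getD_some] at h3
            have h4 := h3 (by simp)
            rw [hord, hord] at h4
            omega
    have := ih _ (Mpre ++ [x]) hstep.1 hstep.2 (fun y hy => hK y (by simp [hy]))
    simpa [List.append_assoc] using this


theorem pv_contains_add (s : PySem.Set Int) (x y : Int) :
    PySem.Set.contains (PySem.Set.add s x) y = (PySem.Set.contains s y || y == x) := by
  rcases eq_or_ne y x with rfl | hne
  · simp [PySem.Set.contains, List.contains_eq_mem, PySem.Set.mem_add]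
  · simp [PySem.Set.contains, List.contains_eq_mem, PySem.Set.mem_add, hne]

-- relation between A's shrinking dict and B's removed set
theorem pvStep_eq (P : PySem.Dict Int (String × PySem.Set Int))
    (hPk : P.keys.Nodup) (hPv : ∀ p ∈ P.items, p.2.2.Nodup)
    (gv : String × PySem.Set Int) (hgv : gv.2.Nodup)
    (bad removed : PySem.Set Int) (d : PySem.Dict Int (String × PySem.Set Int))
    (hrel : d.items = P.items.filter (fun p => !PySem.Set.contains removed p.1)) :
    (pvStepA (bad, d) gv).1 = (pvStepB P (pvMkIndex P.items) (pvMkOrder P.keys) (bad, removed) gv).1 ∧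
    (pvStepA (bad, d) gv).2.items =
      P.items.filter (fun p => !PySem.Set.contains (pvStepB P (pvMkIndex P.items) (pvMkOrder P.keys) (bad, removed) gv).2 p.1) := by
  have hitems_sub : d.items.Sublist P.items := by rw [hrel]; exact List.filter_sublist
  have hdk : (d.items.map (·.1)).Nodup := (hitems_sub.map _).nodup hPk
  have hPpair : P.items.Pairwise (fun a c =>
      (pvMkOrder P.keys).getD a.1 0 < (pvMkOrder P.keys).getD c.1 0) := by
    rw [List.pairwise_iff_getElem]
    intro i j hi hj hij
    have hjk : j < P.keys.length := by simpa [PySem.Dict.keys] using hj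
    have := pvMkOrder_lt P.keys hPk i j hij hjk
    have e1 : P.keys[i]'(by omega) = (P.items[i]'hi).1 := by simp [PySem.Dict.keys]
    have e2 : P.keys[j]'hjk = (P.items[j]'hj).1 := by simp [PySem.Dict.keys]
    rw [e1, e2] at this
    exact this
  have hdpair := hPpair.sublist hitems_sub
  have hbase : pvIsBest (fun k => (pvMkOrder P.keys).getD k 0) [] ((none : Option Int), (0:Int)) :=
    ⟨fun _ => rfl, fun h => absurd rfl h⟩
  have hA := scanA (fun k => (pvMkOrder P.keys).getD k 0) gv.1 gv.2 d.items (none, 0) []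
    hbase le_rfl (by simp) hdpair
  rw [List.nil_append] at hA
  -- B side
  have hK : ∀ x ∈ (pvCounts P (pvMkIndex P.items) removed gv.1 gv.2).items, (1:Int) ≤ x.2 := by
    rintro ⟨pid, n⟩ hx
    rw [pvCounts_eq_counter] at hx
    obtain ⟨hm, rfl⟩ := (pv_mem_counter_items _ pid n).mp hx
    have : 0 < List.count pid _ := List.count_pos_iff.mpr hm
    omega
  have hB := scanB (fun k => (pvMkOrder P.keys).getD k 0) (pvMkOrder P.keys) (fun k => rfl)
    (pvCounts P (pvMkIndex P.items) removed gv.1 gv.2).items (none, 0) [] hbase le_rfl hK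
  rw [List.nil_append] at hB
  -- facts about entries
  have hgetd : ∀ p ∈ P.items, P.getD p.1 ("", []) = p.2 := by
    intro p hp
    exact PySem.Dict.getD_of_mem_items P hp hPk ("", [])
  have hov : ∀ p ∈ P.items, ((PySem.Set.inter p.2.2 gv.2).length : Int)
      = (gv.2.countP (fun t => p.2.2.contains t) : Int) := by
    intro p hp
    have h1 : (PySem.Set.inter p.2.2 gv.2).length = p.2.2.countP (fun t => gv.2.contains t) := by
      rw [List.countP_eq_length_filter]; rfl
    rw [h1]
    exact_mod_cast pv_countP_comm p.2.2 gv.2 (hPv p hp) hgv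
  -- the counted stream
  have hcnt : ∀ p ∈ P.items,
      List.count p.1 ((gv.2.flatMap (fun t => (pvMkIndex P.items).getD t [])).filter
        (fun pid => decide (PySem.Set.contains removed pid = false ∧ (P.getD pid ("", [])).1 = gv.1)))
      = if PySem.Set.contains removed p.1 = false ∧ p.2.1 = gv.1
        then gv.2.countP (fun t => p.2.2.contains t) else 0 := by
    intro p hp
    by_cases hc : PySem.Set.contains removed p.1 = false ∧ (P.getD p.1 ("", [])).1 = gv.1
    · rw [List.count_filter (by simpa using hc), List.count_flatMap]
      have hmap : gv.2.map (List.count p.1 ∘ fun t => (pvMkIndex P.items).getD t [])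
          = gv.2.map (fun t => if t ∈ p.2.2 then 1 else 0) := by
        apply List.map_congr_left
        intro t ht
        exact pv_count_index P.items hPk hPv p.1 p.2.1 p.2.2 (by simpa using hp) t
      rw [hmap, pv_sum_ite gv.2 (fun t => t ∈ p.2.2)]
      rw [if_pos (by rw [hgetd p hp] at hc; exact hc)]
      apply List.countP_congr
      intro t ht
      simp [List.contains_eq_mem]
    · rw [if_neg (by rw [hgetd p hp] at hc; exact hc)]
      rw [List.count_eq_zero]
      intro hmem
      exact hc (by simpa using (List.mem_filter.mp hmem).2)
  -- membership transfer between the two candidate descriptions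
  have hiff : ∀ x, x ∈ (pvCounts P (pvMkIndex P.items) removed gv.1 gv.2).items ↔
      x ∈ (d.items.filter (fun p => decide (p.2.1 = gv.1) &&
            decide (0 < ((PySem.Set.inter p.2.2 gv.2).length : Int)))).map
          (fun p => (p.1, ((PySem.Set.inter p.2.2 gv.2).length : Int))) := by
    rintro ⟨pid, n⟩
    rw [pvCounts_eq_counter, pv_mem_counter_items]
    constructor
    · rintro ⟨hm, rfl⟩
      have hm' := List.mem_filter.mp hm
      have hcond : PySem.Set.contains removed pid = false ∧ (P.getD pid ("", [])).1 = gv.1 := by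
        simpa using hm'.2
      obtain ⟨t, ht, hidx⟩ := List.mem_flatMap.mp hm'.1
      obtain ⟨p, hp, rfl, htp⟩ := (pv_mem_index P.items t pid).mp hidx
      have hd : p ∈ d.items := by
        rw [hrel, List.mem_filter]
        exact ⟨hp, by rw [hcond.1]; rfl⟩
      have hpos : 0 < gv.2.countP (fun t => p.2.2.contains t) := by
        rw [List.countP_pos_iff]
        exact ⟨t, ht, by simpa [List.contains_eq_mem] using htp⟩
      have htype : p.2.1 = gv.1 := by rw [hgetd p hp] at hcond; exact hcond.2
      have hcntv : ((List.count p.1 ((gv.2.flatMap (fun t => (pvMkIndex P.items).getD t [])).filter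
            (fun pid => decide (PySem.Set.contains removed pid = false ∧ (P.getD pid ("", [])).1 = gv.1)))) : Int)
          = ((PySem.Set.inter p.2.2 gv.2).length : Int) := by
        rw [hcnt p hp, if_pos ⟨hcond.1, htype⟩]
        exact (hov p hp).symm
      rw [hcntv]
      apply List.mem_map_of_mem
      rw [List.mem_filter]
      refine ⟨hd, ?_⟩
      simp only [Bool.and_eq_true, decide_eq_true_eq]
      exact ⟨htype, by rw [hov p hp]; exact_mod_cast hpos⟩
    · intro hx
      obtain ⟨p, hpf, heq⟩ := List.mem_map.mp hx
      have hpd := List.mem_filter.mp hpf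
      have hp : p ∈ P.items := hitems_sub.subset hpd.1
      have hnr : PySem.Set.contains removed p.1 = false := by
        have := (List.mem_filter.mp (hrel ▸ hpd.1)).2
        simpa using this
      obtain ⟨hty, hpos⟩ : p.2.1 = gv.1 ∧ 0 < ((PySem.Set.inter p.2.2 gv.2).length : Int) := by
        have := hpd.2
        simp only [Bool.and_eq_true, decide_eq_true_eq] at this
        exact this
      have hpid : p.1 = pid := congrArg Prod.fst heq
      have hn : n = ((PySem.Set.inter p.2.2 gv.2).length : Int) := (congrArg Prod.snd heq).symm
      have hposc : 0 < gv.2.countP (fun t => p.2.2.contains t) := by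
        have := hov p hp ▸ hpos
        exact_mod_cast this
      obtain ⟨t, ht, htc⟩ := List.countP_pos_iff.mp hposc
      constructor
      · rw [List.mem_filter]
        constructor
        · rw [List.mem_flatMap]
          refine ⟨t, ht, ?_⟩
          rw [← hpid]
          exact (pv_mem_index P.items t p.1).mpr ⟨p, hp, rfl, by simpa [List.contains_eq_mem] using htc⟩
        · rw [← hpid]
          simp only [decide_eq_true_eq]
          exact ⟨hnr, by rw [hgetd p hp]; exact hty⟩
      · rw [hn, ← hpid, hcnt p hp, if_pos ⟨hnr, hty⟩, hov p hp]
  -- injectivity of the order on candidates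
  have hinj : ∀ x ∈ (d.items.filter (fun p => decide (p.2.1 = gv.1) &&
        decide (0 < ((PySem.Set.inter p.2.2 gv.2).length : Int)))).map
        (fun p => (p.1, ((PySem.Set.inter p.2.2 gv.2).length : Int))),
      ∀ y ∈ (d.items.filter (fun p => decide (p.2.1 = gv.1) &&
        decide (0 < ((PySem.Set.inter p.2.2 gv.2).length : Int)))).map
        (fun p => (p.1, ((PySem.Set.inter p.2.2 gv.2).length : Int))),
      (fun k => (pvMkOrder P.keys).getD k 0) x.1 = (fun k => (pvMkOrder P.keys).getD k 0) y.1 → x = y := by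
    intro x hx y hy he
    obtain ⟨p, hpf, rfl⟩ := List.mem_map.mp hx
    obtain ⟨q, hqf, rfl⟩ := List.mem_map.mp hy
    have hp : p ∈ P.items := hitems_sub.subset (List.mem_filter.mp hpf).1
    have hq : q ∈ P.items := hitems_sub.subset (List.mem_filter.mp hqf).1
    have hkeq : p.1 = q.1 := by
      apply pvMkOrder_inj P.keys hPk p.1 q.1 (List.mem_map_of_mem hp) (List.mem_map_of_mem hq)
      exact he
    have : p = q := List.inj_on_of_nodup_map hPk hp hq hkeq
    rw [this]
  have hBMA : pvIsBest (fun k => (pvMkOrder P.keys).getD k 0)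
      ((d.items.filter (fun p => decide (p.2.1 = gv.1) &&
          decide (0 < ((PySem.Set.inter p.2.2 gv.2).length : Int)))).map
        (fun p => (p.1, ((PySem.Set.inter p.2.2 gv.2).length : Int))))
      (pvSelect (pvMkOrder P.keys) (pvCounts P (pvMkIndex P.items) removed gv.1 gv.2)) :=
    pvIsBest_congr _ _ _ _ hiff hB
  have hbeq : d.items.foldl (fun b it =>
        if it.2.1 = gv.1 ∧ ((PySem.Set.inter it.2.2 gv.2).length : Int) > b.2
        then (some it.1, ((PySem.Set.inter it.2.2 gv.2).length : Int)) else b)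
        ((none : Option Int), (0:Int))
      = pvSelect (pvMkOrder P.keys) (pvCounts P (pvMkIndex P.items) removed gv.1 gv.2) :=
    pvIsBest_unique _ _ _ _ hinj hA hBMA
  unfold pvStepA pvStepB
  dsimp only
  rw [hbeq]
  rcases hsel : (pvSelect (pvMkOrder P.keys) (pvCounts P (pvMkIndex P.items) removed gv.1 gv.2)).1
    with _ | bid
  · exact ⟨rfl, hrel⟩
  · have hne : (d.items.filter (fun p => decide (p.2.1 = gv.1) &&
          decide (0 < ((PySem.Set.inter p.2.2 gv.2).length : Int)))).map
        (fun p => (p.1, ((PySem.Set.inter p.2.2 gv.2).length : Int))) ≠ [] := by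
      intro hnil
      have h0 := hBMA.1 hnil
      rw [h0] at hsel
      simp at hsel
    obtain ⟨pid, h1, hmem, -⟩ := hBMA.2 hne
    rw [hsel] at h1
    rcases Option.some.inj h1 with rfl
    obtain ⟨p, hpf, heq⟩ := List.mem_map.mp hmem
    have hp1 : p.1 = bid := congrArg Prod.fst heq
    have hpd : p ∈ d.items := (List.mem_filter.mp hpf).1
    have hpP : p ∈ P.items := hitems_sub.subset hpd
    have hget : d.get? bid = some p.2 := by
      rw [← hp1]
      exact PySem.Dict.get?_of_mem_items d hpd hdk
    have hgd : P.getD bid ("", []) = p.2 := by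
      rw [← hp1]
      exact PySem.Dict.getD_of_mem_items P hpP hPk ("", [])
    simp only [hget, hgd]
    refine ⟨trivial, ?_⟩
    have he : (d.erase bid).items = d.items.filter (fun q => !(q.1 == bid)) := rfl
    rw [he, hrel, List.filter_filter]
    apply List.filter_congr
    intro q hq
    rw [pv_contains_add]
    cases PySem.Set.contains removed q.1 <;> cases (q.1 == bid) <;> simp

theorem pvLoop_eq (P : PySem.Dict Int (String × PySem.Set Int))
    (hPk : P.keys.Nodup) (hPv : ∀ p ∈ P.items, p.2.2.Nodup)
    (gvs : List (String × PySem.Set Int)) (hg : ∀ gv ∈ gvs, gv.2.Nodup)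
    (bad removed : PySem.Set Int) (d : PySem.Dict Int (String × PySem.Set Int))
    (hrel : d.items = P.items.filter (fun p => !PySem.Set.contains removed p.1)) :
    (gvs.foldl pvStepA (bad, d)).1 = (gvs.foldl (pvStepB P (pvMkIndex P.items) (pvMkOrder P.keys)) (bad, removed)).1 ∧
    (gvs.foldl pvStepA (bad, d)).2.items =
      P.items.filter (fun p => !PySem.Set.contains (gvs.foldl (pvStepB P (pvMkIndex P.items) (pvMkOrder P.keys)) (bad, removed)).2 p.1) := by
  induction gvs generalizing bad removed d with
  | nil => exact ⟨rfl, hrel⟩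
  | cons gv rest ih =>
    simp only [List.foldl_cons]
    obtain ⟨h1, h2⟩ := pvStep_eq P hPk hPv gv (hg gv (by simp)) bad removed d hrel
    have e1 : pvStepA (bad, d) gv = ((pvStepA (bad, d) gv).1, (pvStepA (bad, d) gv).2) := rfl
    have e2 : pvStepB P (pvMkIndex P.items) (pvMkOrder P.keys) (bad, removed) gv
        = ((pvStepB P (pvMkIndex P.items) (pvMkOrder P.keys) (bad, removed) gv).1,
           (pvStepB P (pvMkIndex P.items) (pvMkOrder P.keys) (bad, removed) gv).2) := rfl
    rw [e1, e2, h1]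
    exact ih (fun x hx => hg x (by simp [hx])) _ _ _ h2

theorem pv_mem_values_foldl {κ ν : Type} [BEq κ] [LawfulBEq κ] (l : List (κ × ν))
    (d : PySem.Dict κ ν) (v : ν)
    (h : v ∈ (l.foldl (fun d p => d.insert p.1 p.2) d).values) :
    v ∈ d.values ∨ v ∈ l.map (·.2) := by
  induction l generalizing d with
  | nil => exact Or.inl h
  | cons p rest ih =>
    rcases ih (d.insert p.1 p.2) h with h1 | h1
    · rcases PySem.Dict.mem_values_insert d p.1 p.2 v h1 with h2 | h2
      · right; simp [h2]
      · exact Or.inl h2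
    · right; simp [h1]

theorem pv_mem_values_ofList {κ ν : Type} [BEq κ] [LawfulBEq κ] (l : List (κ × ν)) (v : ν)
    (h : v ∈ (PySem.Dict.ofList l).values) : v ∈ l.map (·.2) := by
  have := pv_mem_values_foldl l PySem.Dict.empty v h
  simpa [PySem.Dict.values, PySem.Dict.empty] using this

-- ===== VERDICT (by name: the statement is the Claim_ definition above) =====
theorem find_bad_ids_spec : Claim_equal_find_bad_ids := by
  intro gold pred _
  show find_bad_ids gold pred = find_bad_ids_alt gold pred
  unfold find_bad_ids find_bad_ids_alt
  set goldD := PySem.Dict.ofList (gold.map (fun g => (g.1, (g.2.1, PySem.Set.ofList g.2.2)))) with hgD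
  set predD := PySem.Dict.ofList (pred.map (fun p => (p.1, (p.2.1, PySem.Set.ofList p.2.2)))) with hpD
  have hPk : predD.keys.Nodup := PySem.Dict.nodup_keys_ofList _
  have hPv : ∀ p ∈ predD.items, p.2.2.Nodup := by
    intro p hp
    have hv : p.2 ∈ predD.values := List.mem_map_of_mem hp
    rw [hpD] at hv
    have := pv_mem_values_ofList _ _ hv
    simp only [List.map_map, List.mem_map, Function.comp] at this
    obtain ⟨q, -, hq⟩ := this
    rw [← hq]
    exact PySem.Set.nodup_ofList _
  have hg : ∀ gv ∈ goldD.values, gv.2.Nodup := by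
    intro gv hv
    rw [hgD] at hv
    have := pv_mem_values_ofList _ _ hv
    simp only [List.map_map, List.mem_map, Function.comp] at this
    obtain ⟨q, -, hq⟩ := this
    rw [← hq]
    exact PySem.Set.nodup_ofList _
  have hrel0 : predD.items = predD.items.filter (fun p => !PySem.Set.contains PySem.Set.empty p.1) := by
    rw [List.filter_congr (q := fun _ => true) (by intro x hx; rfl), List.filter_true]
  obtain ⟨hbad, hitems⟩ := pvLoop_eq predD hPk hPv goldD.values hg
    PySem.Set.empty PySem.Set.empty predD hrel0
  set ra := goldD.values.foldl pvStepA (PySem.Set.empty, predD) with hra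
  set rb := goldD.values.foldl (pvStepB predD (pvMkIndex predD.items) (pvMkOrder predD.keys))
    (PySem.Set.empty, PySem.Set.empty) with hrb
  show ra.2.values.foldl (fun bad pv => PySem.Set.update bad pv.2) ra.1
    = predD.items.foldl (fun bad it =>
        if PySem.Set.contains rb.2 it.1 = false then PySem.Set.update bad it.2.2 else bad) rb.1
  rw [PySem.List.foldl_ite_eq_foldl_filter
    (p := fun it : Int × String × PySem.Set Int => PySem.Set.contains rb.2 it.1 = false)
    (f := fun bad (it : Int × String × PySem.Set Int) => PySem.Set.update bad it.2.2)]
  rw [PySem.Dict.values, hitems, hbad, List.foldl_map]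
  congr 1
  apply List.filter_congr
  intro x hx
  cases PySem.Set.contains rb.2 x.1 <;> simp
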